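-- pv_equiv track=rewrite | github.com/siddharth1199/aoc_2017 | optum_aoc/2015/day13/d.py | permuation_creator
-- ===== SOURCE A (Python) =====
-- from itertools import permutations
--
-- def permuation_creator(set_of_guests):
--     '''The itertools.permutations function is wasteful as it returns all
--     possible arrangments, ignoring the mirror symetry in the problem
--     A, B, C, D is the same as D, C, B, A
--     and it igores that the circular symetry
--     A, B, C, D is the same as B, C, D, A is the same as C, D, A, B is the same as D, A, B, C
--
--     by only accepting permutations that place A at the start we remove some but
--     not all of this unnecessary duplication
--     we still get A, B, C, D and A, D, C, B which are the same'''
--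
--     all_possible_permuations = permutations(set_of_guests)
--
--     all_possible_permuations_list = []  # shows the full list without placing alice at start (not actually used in code)
--     shortened_permutations_list = []  # shows shortened list (is used in code)
--     for perm in all_possible_permuations:
--         all_possible_permuations_list.append(perm)
--         if perm[0] == 'Alice':
--             shortened_permutations_list.append(perm)
--     return all_possible_permuations_list, shortened_permutations_list
-- ===== SOURCE B (Python) =====
-- from itertools import permutations
--
-- def permuation_creator(set_of_guests):
--     all_possible_permuations_list = list(permutations(set_of_guests))
--     if 'Alice' in set_of_guests:
--         others = [g for g in set_of_guests if g != 'Alice']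
--         shortened_permutations_list = [('Alice',) + p for p in permutations(others)]
--     else:
--         shortened_permutations_list = []
--     return all_possible_permuations_list, shortened_permutations_list
-- ===== Notes on version B (the rewrite author's own statement) =====
-- stated objective: alternative
-- what changed: The Alice-first subset is built directly by prefixing 'Alice' to permutations of the remaining guests instead of scanning every full permutation and filtering on its first element.
import Mathlib
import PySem

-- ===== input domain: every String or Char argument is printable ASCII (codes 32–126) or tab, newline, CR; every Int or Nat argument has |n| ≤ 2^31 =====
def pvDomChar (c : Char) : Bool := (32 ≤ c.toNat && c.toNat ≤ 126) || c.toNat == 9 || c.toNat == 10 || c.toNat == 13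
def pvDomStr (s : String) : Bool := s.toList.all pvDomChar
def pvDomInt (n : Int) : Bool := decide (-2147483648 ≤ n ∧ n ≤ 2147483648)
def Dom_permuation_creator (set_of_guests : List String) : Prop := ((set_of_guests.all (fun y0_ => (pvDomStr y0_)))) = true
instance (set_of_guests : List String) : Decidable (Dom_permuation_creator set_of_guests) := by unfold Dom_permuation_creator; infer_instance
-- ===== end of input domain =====

-- B builds the Alice-first subset directly by prefixing "Alice" to permutations of the
-- remaining guests, instead of filtering every full permutation on its first element
-- (objective: alternative decomposition; same asymptotic cost).

-- ===== PORT A =====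
-- shared helper: itertools.permutations in itertools order — for each element (in list
-- order) paired with the remaining elements, recurse; exact on the admitted inputs
def pvPicks : List String → List (String × List String)
  | [] => []
  | x :: xs => (x, xs) :: (pvPicks xs).map (fun p => (p.1, x :: p.2))

def pyPermsAux : Nat → List String → List (List String)
  | 0, _ => [[]]
  | n + 1, l => (pvPicks l).flatMap (fun p => (pyPermsAux n p.2).map (fun q => p.1 :: q))

def pyPerms (l : List String) : List (List String) := pyPermsAux l.length l

def permuation_creator (set_of_guests : List String) : List (List String) × List (List String) :=
  let all_possible_permuations := pyPerms set_of_guests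
  all_possible_permuations.foldl
    (fun acc perm =>
      (acc.1 ++ [perm],
       if PySem.List.pyGet? perm 0 = some "Alice" then acc.2 ++ [perm] else acc.2))
    ([], [])

-- ===== PORT B =====
def permuation_creator_alt (set_of_guests : List String) : List (List String) × List (List String) :=
  let all_possible_permuations_list := pyPerms set_of_guests
  let shortened_permutations_list :=
    if set_of_guests.contains "Alice" then
      (pyPerms (set_of_guests.filter (fun g => !(g == "Alice")))).map (fun p => "Alice" :: p)
    else []
  (all_possible_permuations_list, shortened_permutations_list)

-- ===== PRECONDITION & SPEC =====
-- Pre_ excludes the empty guest list, on which A raises IndexError (perm[0] of the empty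
-- permutation), and lists naming 'Alice' more than once, where A's filtered subset reflects
-- itertools' positional duplicates while B treats the guests as distinct — a corner no
-- caller of this guest-list function specifies.
def Pre_permuation_creator (set_of_guests : List String) : Prop :=
  set_of_guests ≠ [] ∧ set_of_guests.count "Alice" ≤ 1
instance (set_of_guests : List String) : Decidable (Pre_permuation_creator set_of_guests) := by
  unfold Pre_permuation_creator; infer_instance

def pvWitness_permuation_creator : List String := ["Alice", "Bob"]

def Spec_permuation_creator (set_of_guests : List String) (out : List (List String) × List (List String)) : Prop := out = permuation_creator_alt set_of_guests
instance (set_of_guests : List String) (out : List (List String) × List (List String)) : Decidable (Spec_permuation_creator set_of_guests out) := by unfold Spec_permuation_creator; infer_instance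

-- ===== CLAIM (what is proved, stated in full; the proofs are below) =====
def Claim_equal_permuation_creator : Prop := ∀ (set_of_guests : List String), Dom_permuation_creator set_of_guests → Pre_permuation_creator set_of_guests → Spec_permuation_creator set_of_guests (permuation_creator set_of_guests)

-- ===== LEMMAS AND PROOFS =====

-- A's loop accumulates both lists: all permutations, and those whose first element is "Alice"
theorem pv_foldl_char (xs : List (List String)) (u v : List (List String)) :
    xs.foldl
      (fun acc perm =>
        (acc.1 ++ [perm],
         if PySem.List.pyGet? perm 0 = some "Alice" then acc.2 ++ [perm] else acc.2))
      (u, v)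
    = (u ++ xs, v ++ xs.filter (fun p => decide (PySem.List.pyGet? p 0 = some "Alice"))) := by
  induction xs generalizing u v with
  | nil => simp
  | cons x xs ih =>
    simp only [List.foldl_cons, List.filter_cons]
    by_cases h : PySem.List.pyGet? x 0 = some "Alice" <;> simp [h, ih]

theorem pv_mem_picks_fst : ∀ {l : List String} {p : String × List String},
    p ∈ pvPicks l → p.1 ∈ l := by
  intro l
  induction l with
  | nil => intro p h; simp [pvPicks] at h
  | cons x xs ih =>
    intro p h
    simp only [pvPicks, List.mem_cons, List.mem_map] at h
    rcases h with h | ⟨q, hq, rfl⟩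
    · simp [h]
    · exact List.mem_cons_of_mem _ (ih (p := q) hq)

-- filtering the flatMap of per-pick blocks keeps exactly the blocks whose pick is "Alice"
theorem pv_filter_blocks (ps : List (String × List String)) (n : Nat) :
    (ps.flatMap (fun p => (pyPermsAux n p.2).map (fun q => p.1 :: q))).filter
        (fun p => decide (PySem.List.pyGet? p 0 = some "Alice"))
    = (ps.filter (fun p => decide (p.1 = "Alice"))).flatMap
        (fun p => (pyPermsAux n p.2).map (fun q => p.1 :: q)) := by
  induction ps with
  | nil => simp
  | cons p ps ih =>
    simp only [List.flatMap_cons, List.filter_append, List.filter_cons, ih]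
    by_cases h : p.1 = "Alice"
    · simp [h, List.filter_map, Function.comp_def]
    · simp [h, List.filter_map, Function.comp_def]

theorem pv_picks_none {l : List String} (h : "Alice" ∉ l) :
    (pvPicks l).filter (fun p => decide (p.1 = "Alice")) = [] := by
  apply List.filter_eq_nil_iff.mpr
  intro p hp
  simp only [decide_eq_true_eq]
  intro he
  exact h (he ▸ pv_mem_picks_fst hp)

theorem pv_picks_one : ∀ (l : List String), l.count "Alice" = 1 →
    (pvPicks l).filter (fun p => decide (p.1 = "Alice"))
    = [("Alice", l.filter (fun g => !(g == "Alice")))] := by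
  intro l
  induction l with
  | nil => simp
  | cons x xs ih =>
    intro hc
    rw [List.count_cons] at hc
    by_cases hx : x = "Alice"
    · subst hx
      simp only [BEq.rfl, if_true] at hc
      have h0 : "Alice" ∉ xs := by
        intro hm
        have := List.count_pos_iff.mpr hm
        omega
      have hmap := pv_picks_none h0
      have hself : xs.filter (fun g => !(g == "Alice")) = xs := by
        apply List.filter_eq_self.mpr
        intro a ha
        simp only [Bool.not_eq_eq_eq_not, Bool.not_true, beq_eq_false_iff_ne]
        intro he; exact h0 (he ▸ ha)
      simp [pvPicks, List.filter_map, Function.comp_def, hself, hmap]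
    · have hb : (x == "Alice") = false := by simpa using hx
      rw [hb] at hc
      simp only [Bool.false_eq_true, if_false, Nat.add_zero] at hc
      have hmap := ih hc
      simp [pvPicks, List.filter_map, Function.comp_def, hx, hmap]

theorem pv_len_filter : ∀ (l : List String),
    (l.filter (fun g => !(g == "Alice"))).length + l.count "Alice" = l.length := by
  intro l
  induction l with
  | nil => simp
  | cons x xs ih =>
    rw [List.count_cons]
    by_cases hx : x = "Alice"
    · subst hx
      simp only [List.filter_cons, BEq.rfl, Bool.not_true, Bool.false_eq_true, if_false,
        if_true, List.length_cons]
      omega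
    · have hb : (x == "Alice") = false := by simpa using hx
      simp only [List.filter_cons, hb, Bool.not_false, if_true, Bool.false_eq_true,
        if_false, List.length_cons]
      omega

-- ===== VERDICT (by name: the statement is the Claim_ definition above) =====
theorem permuation_creator_spec : Claim_equal_permuation_creator := by
  intro l _ hpre
  obtain ⟨hne, hcnt⟩ := hpre
  unfold Spec_permuation_creator permuation_creator permuation_creator_alt
  rw [pv_foldl_char]
  simp only [List.nil_append]
  obtain ⟨m, hm⟩ : ∃ m, l.length = m + 1 := by
    cases l with
    | nil => exact absurd rfl hne
    | cons x xs => exact ⟨xs.length, rfl⟩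
  by_cases hmem : "Alice" ∈ l
  · have hone : l.count "Alice" = 1 := by
      have := List.count_pos_iff.mpr hmem
      omega
    have hc : l.contains "Alice" = true := by simpa using hmem
    rw [hc]
    simp only [if_true]
    rw [show pyPerms l = pyPermsAux l.length l from rfl, hm, pyPermsAux,
      pv_filter_blocks, pv_picks_one l hone]
    have hlen : (l.filter (fun g => !(g == "Alice"))).length = m := by
      have h1 := pv_len_filter l
      omega
    rw [show pyPerms (l.filter (fun g => !(g == "Alice")))
        = pyPermsAux (l.filter (fun g => !(g == "Alice"))).length
            (l.filter (fun g => !(g == "Alice"))) from rfl, hlen]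
    simp
  · have hc : l.contains "Alice" = false := by simpa using hmem
    rw [hc]
    simp only [Bool.false_eq_true, if_false]
    rw [show pyPerms l = pyPermsAux l.length l from rfl, hm, pyPermsAux,
      pv_filter_blocks, pv_picks_none hmem]
    simp
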